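-- pv_equiv track=rewrite | github.com/Cruellest/painel_pj | sistemas/pedido_calculo/agentes.py | _montar_texto_documentos
-- ===== SOURCE A (Python) =====
-- from typing import Dict, List, Optional, Any, Tuple
--
-- def _montar_texto_documentos(textos: Dict[str, str]) -> str:
--     """Monta texto consolidado dos documentos para análise"""
--     partes = []
--
--     ordem = ["sentenca", "acordao", "sentenca_homologacao", "certidao_citacao",
--              "certidao_intimacao", "pedido_cumprimento", "planilha_calculo"]
--
--     for tipo in ordem:
--         if tipo in textos and textos[tipo]:
--             titulo = tipo.replace("_", " ").title()
--             partes.append(f"### {titulo}\n{textos[tipo]}\n")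
--
--     # Adiciona documentos não mapeados
--     for tipo, texto in textos.items():
--         if tipo not in ordem and texto:
--             titulo = tipo.replace("_", " ").title()
--             partes.append(f"### {titulo}\n{texto}\n")
--
--     return "\n---\n".join(partes)
-- ===== SOURCE B (Python) =====
-- def _montar_texto_documentos(textos):
--     """Monta texto consolidado dos documentos para análise"""
--     ordem = ["sentenca", "acordao", "sentenca_homologacao", "certidao_citacao",
--              "certidao_intimacao", "pedido_cumprimento", "planilha_calculo"]
--     rank = {t: i for i, t in enumerate(ordem)}
--     itens = sorted(textos.items(), key=lambda kv: rank.get(kv[0], len(ordem)))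
--     return "\n---\n".join(
--         f"### {tipo.replace('_', ' ').title()}\n{texto}\n"
--         for tipo, texto in itens if texto
--     )
-- ===== Notes on version B (the rewrite author's own statement) =====
-- stated objective: idiomatic
-- what changed: A makes two passes over the dict (a fixed-order scan over 'ordem' with lookups, then a leftover scan for unmapped types); B builds a rank map from 'ordem' once, stably sorts textos.items() by that rank, and emits everything in one filter-and-format pass.
import Mathlib
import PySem

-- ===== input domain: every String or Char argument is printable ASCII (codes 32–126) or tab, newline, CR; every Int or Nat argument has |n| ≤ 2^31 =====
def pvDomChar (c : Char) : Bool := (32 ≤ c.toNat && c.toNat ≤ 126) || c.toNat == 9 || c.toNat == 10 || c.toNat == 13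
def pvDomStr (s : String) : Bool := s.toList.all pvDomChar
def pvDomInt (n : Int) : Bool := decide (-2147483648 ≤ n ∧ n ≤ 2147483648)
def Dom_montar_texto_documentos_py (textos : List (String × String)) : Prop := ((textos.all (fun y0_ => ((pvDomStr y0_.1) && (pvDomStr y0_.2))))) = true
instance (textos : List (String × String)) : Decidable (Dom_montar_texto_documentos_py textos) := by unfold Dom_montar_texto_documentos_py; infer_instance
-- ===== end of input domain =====

-- B replaces A's two passes (fixed-order scan, then leftover scan) by a rank map, one stable
-- sort of the items, and a single filter-and-format pass (objective: idiomatic).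

-- shared formatting helpers (both Pythons build the identical f-string "### {titulo}\n{texto}\n")

-- str.title(): a letter is uppercased iff the previous character is not a letter (exact on Dom's ASCII strings)
def pvTitleChars : Bool → List Char → List Char
  | _, [] => []
  | prevAlpha, c :: cs =>
    (if c.isAlpha then (if prevAlpha then c.toLower else c.toUpper) else c) :: pvTitleChars c.isAlpha cs

def pvTitle (s : String) : String := String.ofList (pvTitleChars false s.toList)

def pvFmt (tipo texto : String) : String :=
  "### " ++ pvTitle (PySem.Str.replace tipo "_" " ") ++ "\n" ++ texto ++ "\n"

def pvOrdem : List String :=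
  ["sentenca", "acordao", "sentenca_homologacao", "certidao_citacao",
   "certidao_intimacao", "pedido_cumprimento", "planilha_calculo"]

-- ===== PORT A =====
def montar_texto_documentos_py (textos : List (String × String)) : String :=
  let partes : List String :=
    pvOrdem.foldl (fun acc tipo =>
      match PySem.Dict.get? (PySem.Dict.mk textos) tipo with   -- 'tipo in textos and textos[tipo]'
      | some t => if t != "" then acc ++ [pvFmt tipo t] else acc
      | none => acc) []
  let partes :=
    textos.foldl (fun acc kv =>
      if !(pvOrdem.contains kv.1) && (kv.2 != "") then acc ++ [pvFmt kv.1 kv.2] else acc) partes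
  PySem.Str.join "\n---\n" partes

-- ===== PORT B =====
-- rank = {t: i for i, t in enumerate(ordem)}
def pvRank : PySem.Dict String Int :=
  (PySem.List.enumerate pvOrdem).foldl (fun d it => PySem.Dict.insert d it.2 it.1) (PySem.Dict.mk [])

def montar_texto_documentos_py_alt (textos : List (String × String)) : String :=
  let itens := PySem.List.sorted textos (fun kv => PySem.Dict.getD pvRank kv.1 ((pvOrdem.length : Int))) false
  PySem.Str.join "\n---\n" ((itens.filter (fun kv => kv.2 != "")).map (fun kv => pvFmt kv.1 kv.2))

-- ===== PRECONDITION & SPEC =====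
-- Pre_ requires the association list's keys to be distinct: the Python argument is a dict[str, str],
-- which cannot carry duplicate keys, so this excludes no input the Python A accepts.
def Pre_montar_texto_documentos_py (textos : List (String × String)) : Prop :=
  (textos.map Prod.fst).Nodup
instance (textos : List (String × String)) : Decidable (Pre_montar_texto_documentos_py textos) := by
  unfold Pre_montar_texto_documentos_py; infer_instance

def pvWitness_montar_texto_documentos_py : (List (String × String)) :=
  [("acordao", "B"), ("laudo_pericial", "L"), ("sentenca", "A"), ("nota", "")]

def Spec_montar_texto_documentos_py (textos : List (String × String)) (out : String) : Prop := out = montar_texto_documentos_py_alt textos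
instance (textos : List (String × String)) (out : String) : Decidable (Spec_montar_texto_documentos_py textos out) := by unfold Spec_montar_texto_documentos_py; infer_instance

-- ===== CLAIM (what is proved, stated in full; the proofs are below) =====
def Claim_equal_montar_texto_documentos_py : Prop := ∀ (textos : List (String × String)), Dom_montar_texto_documentos_py textos → Pre_montar_texto_documentos_py textos → Spec_montar_texto_documentos_py textos (montar_texto_documentos_py textos)

-- ===== LEMMAS AND PROOFS =====

-- closed form of B's rank lookup
def pvKey (s : String) : Int :=
  if s = "sentenca" then 0 else if s = "acordao" then 1 else if s = "sentenca_homologacao" then 2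
  else if s = "certidao_citacao" then 3 else if s = "certidao_intimacao" then 4
  else if s = "pedido_cumprimento" then 5 else if s = "planilha_calculo" then 6 else 7

lemma pvKey_eq (s : String) : PySem.Dict.getD pvRank s ((pvOrdem.length : Int)) = pvKey s := by
  rw [show pvRank = PySem.Dict.mk
      [("sentenca", 0), ("acordao", 1), ("sentenca_homologacao", 2), ("certidao_citacao", 3),
       ("certidao_intimacao", 4), ("pedido_cumprimento", 5), ("planilha_calculo", 6)] from rfl]
  unfold pvKey
  split_ifs with h0 h1 h2 h3 h4 h5 h6
  · subst h0; rfl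
  · subst h1; rfl
  · subst h2; rfl
  · subst h3; rfl
  · subst h4; rfl
  · subst h5; rfl
  · subst h6; rfl
  · have e0 : ("sentenca" == s) = false := beq_eq_false_iff_ne.mpr (fun h => h0 h.symm)
    have e1 : ("acordao" == s) = false := beq_eq_false_iff_ne.mpr (fun h => h1 h.symm)
    have e2 : ("sentenca_homologacao" == s) = false := beq_eq_false_iff_ne.mpr (fun h => h2 h.symm)
    have e3 : ("certidao_citacao" == s) = false := beq_eq_false_iff_ne.mpr (fun h => h3 h.symm)
    have e4 : ("certidao_intimacao" == s) = false := beq_eq_false_iff_ne.mpr (fun h => h4 h.symm)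
    have e5 : ("pedido_cumprimento" == s) = false := beq_eq_false_iff_ne.mpr (fun h => h5 h.symm)
    have e6 : ("planilha_calculo" == s) = false := beq_eq_false_iff_ne.mpr (fun h => h6 h.symm)
    simp [PySem.Dict.getD, PySem.Dict.get?, List.find?, e0, e1, e2, e3, e4, e5, e6, pvOrdem]

lemma pvKey_bounds (s : String) : 0 ≤ pvKey s ∧ pvKey s < 8 := by
  unfold pvKey; split_ifs <;> omega

-- the Int indices 0, 1, …, n-1
def pvInts : Nat → List Int
  | 0 => []
  | n + 1 => pvInts n ++ [(n : Int)]

lemma mem_pvInts {n : Nat} {i : Int} (h : i ∈ pvInts n) : 0 ≤ i ∧ i < n := by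
  induction n with
  | zero => simp [pvInts] at h
  | succ m ih =>
    rw [show pvInts (m + 1) = pvInts m ++ [(m : Int)] from rfl, List.mem_append] at h
    rcases h with h | h
    · have := ih h; omega
    · simp at h; omega

-- insertBy skips over a tail every element of which compares after x
lemma insertBy_append_right {α : Type} (before : α → α → Bool) (x : α) (l1 l2 : List α)
    (h : ∀ y ∈ l2, before x y = true) :
    PySem.List.insertBy before x (l1 ++ l2) = PySem.List.insertBy before x l1 ++ l2 := by
  induction l1 with
  | nil =>
    cases l2 with
    | nil => rfl
    | cons y t => simp [PySem.List.insertBy, h y (by simp)]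
  | cons y t ih =>
    by_cases hy : before x y = true <;> simp [PySem.List.insertBy, hy, ih]

-- inserting x into the bucket decomposition appends it to its own bucket
lemma insertBy_buckets {α : Type} (key : α → Int) (x : α) (xs : List α) (m : Nat)
    (h0 : 0 ≤ key x) (hm : key x < m) :
    PySem.List.insertBy (fun a b => decide (key a < key b)) x
      ((pvInts m).flatMap (fun i => xs.filter (fun y => decide (key y = i))))
    = (pvInts m).flatMap (fun i => (xs ++ [x]).filter (fun y => decide (key y = i))) := by
  induction m with
  | zero => omega
  | succ m ih =>
    rw [show pvInts (m + 1) = pvInts m ++ [(m : Int)] from rfl, List.flatMap_append,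
      List.flatMap_append]
    simp only [List.flatMap_cons, List.flatMap_nil, List.append_nil]
    by_cases hkm : key x < m
    · have hb : ∀ y ∈ xs.filter (fun y => decide (key y = (m : Int))),
          (fun a b => decide (key a < key b)) x y = true := by
        intro y hy
        have := (List.mem_filter.mp hy).2
        simp only [decide_eq_true_eq] at this ⊢
        omega
      rw [insertBy_append_right _ _ _ _ hb, ih hkm]
      have h2 : ((xs ++ [x]).filter (fun y => decide (key y = (m : Int))))
          = xs.filter (fun y => decide (key y = (m : Int))) := by
        rw [List.filter_append]
        have : (decide (key x = (m : Int))) = false := by simp; omega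
        simp [this]
      rw [h2]
    · have hxm : key x = (m : Int) := by omega
      have hall : ∀ y ∈ (pvInts m).flatMap (fun i => xs.filter (fun y => decide (key y = i)))
          ++ xs.filter (fun y => decide (key y = (m : Int))),
          (fun a b => decide (key a < key b)) x y = false := by
        intro y hy
        rcases List.mem_append.mp hy with hy | hy
        · rcases List.mem_flatMap.mp hy with ⟨i, hi, hyf⟩
          have h1 := (List.mem_filter.mp hyf).2
          have h2 := mem_pvInts hi
          simp only [decide_eq_true_eq] at h1
          simp only [decide_eq_false_iff_not]
          omega
        · have h1 := (List.mem_filter.mp hy).2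
          simp only [decide_eq_true_eq] at h1
          simp only [decide_eq_false_iff_not]
          omega
      rw [PySem.List.insertBy_of_forall_not_before _ _ _ hall]
      have hbm : ((xs ++ [x]).filter (fun y => decide (key y = (m : Int))))
          = xs.filter (fun y => decide (key y = (m : Int))) ++ [x] := by
        rw [List.filter_append]
        simp [hxm]
      have hfm : ((pvInts m).flatMap (fun i => (xs ++ [x]).filter (fun y => decide (key y = i))))
          = (pvInts m).flatMap (fun i => xs.filter (fun y => decide (key y = i))) := by
        apply List.flatMap_congr
        intro i hi
        have h2 := mem_pvInts hi
        rw [List.filter_append]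
        have : (decide (key x = i)) = false := by
          simp only [decide_eq_false_iff_not]
          omega
        simp [this]
      rw [hbm, hfm, List.append_assoc]

-- a stable sort by an Int key with values in [0, n) is the concatenation of the key buckets
lemma sorted_buckets {α : Type} (key : α → Int) (n : Nat) (xs : List α)
    (h : ∀ x ∈ xs, 0 ≤ key x ∧ key x < n) :
    PySem.List.sorted xs key false
      = (pvInts n).flatMap (fun i => xs.filter (fun y => decide (key y = i))) := by
  induction xs using List.reverseRecOn with
  | nil => simp [PySem.List.sorted]
  | append_singleton xs x ih =>
    rw [PySem.List.sorted_eq_foldl_insertBy, List.foldl_append,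
      ← PySem.List.sorted_eq_foldl_insertBy]
    simp only [List.foldl_cons, List.foldl_nil]
    rw [ih (fun y hy => h y (by simp [hy]))]
    exact insertBy_buckets key x xs n (h x (by simp)).1 (h x (by simp)).2

-- with distinct keys, the sublist with a given key is exactly the dict lookup
lemma filter_eq_lookup (textos : List (String × String)) (name : String)
    (h : (textos.map Prod.fst).Nodup) :
    textos.filter (fun kv => decide (kv.1 = name))
      = (match PySem.Dict.get? (PySem.Dict.mk textos) name with
         | some v => [(name, v)] | none => []) := by
  induction textos with
  | nil => simp [PySem.Dict.get?]
  | cons kv t ih =>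
    simp only [List.map_cons, List.nodup_cons] at h
    by_cases hk : kv.1 = name
    · have hf : t.filter (fun kv => decide (kv.1 = name)) = [] := by
        apply List.filter_eq_nil_iff.mpr
        intro p hp hq
        simp only [decide_eq_true_eq] at hq
        exact h.1 (by rw [hk, ← hq]; exact List.mem_map_of_mem hp)
      simp only [List.filter_cons, hk, decide_true, if_true, hf, PySem.Dict.get?, List.find?]
      obtain ⟨k, v⟩ := kv
      simp only at hk
      subst hk
      simp
    · have hb : (kv.1 == name) = false := beq_eq_false_iff_ne.mpr hk
      simp only [List.filter_cons, decide_eq_true_eq, hk, if_false, PySem.Dict.get?, List.find?, hb]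
      exact ih h.2

-- A's first loop, as a flatMap over the (generic) order list
lemma loopA1 (textos : List (String × String)) (l : List String) (acc : List String) :
    l.foldl (fun acc tipo =>
      match PySem.Dict.get? (PySem.Dict.mk textos) tipo with
      | some t => if t != "" then acc ++ [pvFmt tipo t] else acc
      | none => acc) acc
    = acc ++ l.flatMap (fun tipo =>
        (match PySem.Dict.get? (PySem.Dict.mk textos) tipo with
         | some t => if t != "" then [pvFmt tipo t] else []
         | none => [])) := by
  induction l generalizing acc with
  | nil => simp
  | cons tipo t ih =>
    cases hg : PySem.Dict.get? (PySem.Dict.mk textos) tipo with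
    | none =>
      simp only [List.foldl_cons, List.flatMap_cons, hg]
      rw [List.nil_append]
      exact ih acc
    | some v =>
      simp only [List.foldl_cons, List.flatMap_cons, hg]
      by_cases hv : (v != "") = true
      · rw [if_pos hv, if_pos hv, ih, List.append_assoc]
      · rw [if_neg hv, if_neg hv, ih, List.nil_append]

-- pointwise: pvKey picks out each name / the unmapped remainder
lemma key_is0 (s : String) : decide (pvKey s = 0) = decide (s = "sentenca") := by
  unfold pvKey; split_ifs <;> simp_all
lemma key_is1 (s : String) : decide (pvKey s = 1) = decide (s = "acordao") := by
  unfold pvKey; split_ifs <;> simp_all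
lemma key_is2 (s : String) : decide (pvKey s = 2) = decide (s = "sentenca_homologacao") := by
  unfold pvKey; split_ifs <;> simp_all
lemma key_is3 (s : String) : decide (pvKey s = 3) = decide (s = "certidao_citacao") := by
  unfold pvKey; split_ifs <;> simp_all
lemma key_is4 (s : String) : decide (pvKey s = 4) = decide (s = "certidao_intimacao") := by
  unfold pvKey; split_ifs <;> simp_all
lemma key_is5 (s : String) : decide (pvKey s = 5) = decide (s = "pedido_cumprimento") := by
  unfold pvKey; split_ifs <;> simp_all
lemma key_is6 (s : String) : decide (pvKey s = 6) = decide (s = "planilha_calculo") := by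
  unfold pvKey; split_ifs <;> simp_all
lemma key_is7 (s : String) : decide (pvKey s = 7) = !(pvOrdem.contains s) := by
  unfold pvKey pvOrdem; split_ifs <;> simp_all

-- one ordered bucket, filtered and formatted, is one step of A's first loop
lemma bucket_step (textos : List (String × String)) (name : String)
    (h : (textos.map Prod.fst).Nodup) :
    ((textos.filter (fun kv => decide (kv.1 = name))).filter (fun kv => kv.2 != "")).map
        (fun kv => pvFmt kv.1 kv.2)
      = (match PySem.Dict.get? (PySem.Dict.mk textos) name with
         | some t => if t != "" then [pvFmt name t] else []
         | none => []) := by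
  rw [filter_eq_lookup textos name h]
  cases PySem.Dict.get? (PySem.Dict.mk textos) name with
  | none => simp
  | some v => by_cases hv : (v != "") = true <;> simp [hv]

-- ===== VERDICT (by name: the statement is the Claim_ definition above) =====
theorem montar_texto_documentos_py_spec : Claim_equal_montar_texto_documentos_py := by
  intro textos _ hpre
  unfold Spec_montar_texto_documentos_py montar_texto_documentos_py montar_texto_documentos_py_alt
  dsimp only
  rw [funext (fun kv : String × String => pvKey_eq kv.1),
    sorted_buckets (fun kv => pvKey kv.1) 8 textos (fun x _ => pvKey_bounds x.1),
    show pvInts 8 = [0, 1, 2, 3, 4, 5, 6, 7] from by decide]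
  simp only [List.flatMap_cons, List.flatMap_nil, List.append_nil, List.filter_append,
    List.map_append]
  rw [List.filter_congr (p := fun y : String × String => decide (pvKey y.1 = 0))
    (q := fun y : String × String => decide (y.1 = "sentenca")) (fun x _ => key_is0 x.1)]
  rw [List.filter_congr (p := fun y : String × String => decide (pvKey y.1 = 1))
    (q := fun y : String × String => decide (y.1 = "acordao")) (fun x _ => key_is1 x.1)]
  rw [List.filter_congr (p := fun y : String × String => decide (pvKey y.1 = 2))
    (q := fun y : String × String => decide (y.1 = "sentenca_homologacao")) (fun x _ => key_is2 x.1)]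
  rw [List.filter_congr (p := fun y : String × String => decide (pvKey y.1 = 3))
    (q := fun y : String × String => decide (y.1 = "certidao_citacao")) (fun x _ => key_is3 x.1)]
  rw [List.filter_congr (p := fun y : String × String => decide (pvKey y.1 = 4))
    (q := fun y : String × String => decide (y.1 = "certidao_intimacao")) (fun x _ => key_is4 x.1)]
  rw [List.filter_congr (p := fun y : String × String => decide (pvKey y.1 = 5))
    (q := fun y : String × String => decide (y.1 = "pedido_cumprimento")) (fun x _ => key_is5 x.1)]
  rw [List.filter_congr (p := fun y : String × String => decide (pvKey y.1 = 6))
    (q := fun y : String × String => decide (y.1 = "planilha_calculo")) (fun x _ => key_is6 x.1)]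
  rw [List.filter_congr (p := fun y : String × String => decide (pvKey y.1 = 7))
    (q := fun y : String × String => !(pvOrdem.contains y.1)) (fun x _ => key_is7 x.1)]
  rw [bucket_step textos "sentenca" hpre, bucket_step textos "acordao" hpre,
    bucket_step textos "sentenca_homologacao" hpre, bucket_step textos "certidao_citacao" hpre,
    bucket_step textos "certidao_intimacao" hpre, bucket_step textos "pedido_cumprimento" hpre,
    bucket_step textos "planilha_calculo" hpre]
  rw [loopA1, PySem.List.foldl_append_if, List.filter_filter,
    List.filter_congr (fun x _ => Bool.and_comm _ _)]
  simp only [pvOrdem, List.flatMap_cons, List.flatMap_nil, List.append_nil, List.nil_append,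
    List.append_assoc]
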